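-- pv_equiv track=rewrite | github.com/leejaerim/Algorithm | Programmers/숫자카드 나누기/숫자카드나누기.py | isDivied
-- ===== SOURCE A (Python) =====
-- def isDivied(numbers:list,target:list):
--     for i in target:
--         temp = []
--         for j in numbers:
--             if i % j == 0:
--                 temp.append(j)
--         for j in temp:
--             numbers.remove(j)
--     if len(numbers) == 0 :
--         return [0]
--     else:
--         return numbers
-- ===== SOURCE B (Python) =====
-- def isDivied(numbers: list, target: list):
--     # Decide divisibility once per distinct card value, then filter in one pass.
--     bad = set()
--     for v in set(numbers):
--         for i in target:
--             if i % v == 0: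
--                 bad.add(v)
--                 break
--     numbers[:] = [j for j in numbers if j not in bad]
--     return numbers if numbers else [0]
-- ===== Notes on version B (the rewrite author's own statement) =====
-- stated objective: alternative
-- what changed: Replaces A's per-target scan-collect-then-remove loops with one divisibility test per distinct card value building a bad-value set, followed by a single membership filter pass; keeps the in-place mutation of numbers.
import Mathlib
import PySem

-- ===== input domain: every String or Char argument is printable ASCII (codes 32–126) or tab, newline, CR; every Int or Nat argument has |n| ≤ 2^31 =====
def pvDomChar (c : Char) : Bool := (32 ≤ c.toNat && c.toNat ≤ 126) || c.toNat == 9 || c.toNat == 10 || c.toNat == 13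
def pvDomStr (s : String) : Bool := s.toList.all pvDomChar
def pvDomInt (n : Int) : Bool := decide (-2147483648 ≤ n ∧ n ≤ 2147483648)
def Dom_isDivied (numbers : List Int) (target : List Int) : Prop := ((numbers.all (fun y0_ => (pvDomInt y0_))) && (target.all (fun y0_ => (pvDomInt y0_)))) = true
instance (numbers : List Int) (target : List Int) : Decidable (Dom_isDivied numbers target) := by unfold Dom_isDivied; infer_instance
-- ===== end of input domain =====

-- B decides divisibility once per distinct card value, building a set of bad values, then
-- filters in one pass, instead of A's per-target collect-and-remove loops (alternative algorithm). Both mutate `numbers` in place in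
-- Python; the equivalence proved here is about the return value.

-- ===== PORT A =====
-- 'numbers.remove(j)' raises ValueError when j is absent; that never happens here
-- (temp holds occurrences of numbers), so '.getD acc' is an unreachable default.
def isDivied (numbers : List Int) (target : List Int) : List Int :=
  let numbers := target.foldl (fun numbers i =>
    let temp := numbers.foldl
      (fun temp j => if PySem.Int.mod i j == 0 then temp ++ [j] else temp) []
    temp.foldl (fun numbers j => (PySem.List.remove? numbers j).getD numbers) numbers) numbers
  if numbers.length == 0 then [0] else numbers

-- ===== PORT B =====
-- 'for i in target: … break' is the short-circuiting List.any over target.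
-- B iterates over a Python set only to build another set (order-independent).
def isDivied_alt (numbers : List Int) (target : List Int) : List Int :=
  let bad : PySem.Set Int :=
    (PySem.Set.ofList numbers).foldl
      (fun bad v => if target.any (fun i => PySem.Int.mod i v == 0) then PySem.Set.add bad v else bad)
      PySem.Set.empty
  let res := numbers.filter (fun j => !(PySem.Set.contains bad j))
  if res.isEmpty then [0] else res

-- ===== PRECONDITION & SPEC =====
-- Python A (and B) raise ZeroDivisionError when a 0 card meets a non-empty target list.
def Pre_isDivied (numbers : List Int) (target : List Int) : Prop :=
  target = [] ∨ (0 : Int) ∉ numbers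
instance (numbers : List Int) (target : List Int) : Decidable (Pre_isDivied numbers target) := by
  unfold Pre_isDivied; infer_instance
def pvWitness_isDivied : List Int × List Int := ([3, 5, 7], [10, 12])

def Spec_isDivied (numbers : List Int) (target : List Int) (out : List Int) : Prop := out = isDivied_alt numbers target
instance (numbers : List Int) (target : List Int) (out : List Int) : Decidable (Spec_isDivied numbers target out) := by unfold Spec_isDivied; infer_instance

-- ===== CLAIM (what is proved, stated in full; the proofs are below) =====
def Claim_equal_isDivied : Prop := ∀ (numbers : List Int) (target : List Int), Dom_isDivied numbers target → Pre_isDivied numbers target → Spec_isDivied numbers target (isDivied numbers target)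

-- ===== LEMMAS AND PROOFS =====

-- Removing a list of elements that all satisfy q from a list whose head does not.
theorem foldl_remove_cons (ts : List Int) (q : Int → Bool) (hts : ∀ t ∈ ts, q t = true)
    (x : Int) (hx : q x = false) (xs : List Int) :
    ts.foldl (fun acc j => (PySem.List.remove? acc j).getD acc) (x :: xs)
      = x :: ts.foldl (fun acc j => (PySem.List.remove? acc j).getD acc) xs := by
  induction ts generalizing xs with
  | nil => rfl
  | cons t ts ih =>
    have hne : x ≠ t := by
      intro h; rw [h] at hx; exact absurd (hts t (by simp)) (by simp [hx])
    have hrem : (PySem.List.remove? (x :: xs) t).getD (x :: xs)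
        = x :: (PySem.List.remove? xs t).getD xs := by
      rw [PySem.List.remove?_cons_of_ne xs hne]
      cases PySem.List.remove? xs t <;> simp
    simp only [List.foldl_cons, hrem]
    exact ih (fun t ht => hts t (by simp [ht])) _

-- A's inner remove loop over the collected divisors is a filter.
theorem foldl_remove_filter (l : List Int) (q : Int → Bool) :
    (l.filter q).foldl (fun acc j => (PySem.List.remove? acc j).getD acc) l
      = l.filter (fun j => !q j) := by
  induction l with
  | nil => rfl
  | cons x xs ih =>
    by_cases hx : q x = true
    · simp only [List.filter_cons, hx, if_pos trivial, List.foldl_cons,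
        PySem.List.remove?_cons_self, Option.getD_some]
      simp [ih]
    · have hx' : q x = false := by simpa using hx
      rw [List.filter_cons_of_neg (by simp [hx']),
        foldl_remove_cons _ q (fun t ht => (List.mem_filter.mp ht).2) x hx', ih]
      simp [hx']

-- A's outer loop over targets is a filter by "no target is divided".
theorem foldl_filter_targets (ts : List Int) (l : List Int) :
    ts.foldl (fun l i =>
        (l.foldl (fun temp j => if PySem.Int.mod i j == 0 then temp ++ [j] else temp) []).foldl
          (fun acc j => (PySem.List.remove? acc j).getD acc) l) l
      = l.filter (fun j => !ts.any (fun i => PySem.Int.mod i j == 0)) := by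
  induction ts generalizing l with
  | nil => simp
  | cons t ts ih =>
    simp only [List.foldl_cons]
    rw [PySem.List.foldl_append_if_eq_filter, List.nil_append, foldl_remove_filter, ih,
      List.filter_filter]
    apply List.filter_congr
    intro j _
    cases h : PySem.Int.mod t j == 0 <;> simp [h]

-- Membership in the set built by B's guarded fold.
theorem mem_foldl_add (q : Int → Bool) (ds : List Int) (s : PySem.Set Int) (j : Int) :
    (j ∈ ds.foldl (fun s v => if q v then PySem.Set.add s v else s) s)
      ↔ j ∈ s ∨ (j ∈ ds ∧ q j = true) := by
  induction ds generalizing s with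
  | nil => simp
  | cons d ds ih =>
    rw [List.foldl_cons]
    by_cases hd : q d = true
    · rw [if_pos hd, ih]
      simp only [PySem.Set.mem_add, List.mem_cons]
      constructor
      · rintro ((h | rfl) | h)
        · exact Or.inl h
        · exact Or.inr ⟨Or.inl rfl, hd⟩
        · exact Or.inr ⟨Or.inr h.1, h.2⟩
      · rintro (h | ⟨rfl | h, hq⟩)
        · exact Or.inl (Or.inl h)
        · exact Or.inl (Or.inr rfl)
        · exact Or.inr ⟨h, hq⟩
    · rw [if_neg hd, ih]
      simp only [List.mem_cons]
      constructor
      · rintro (h | h)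
        · exact Or.inl h
        · exact Or.inr ⟨Or.inr h.1, h.2⟩
      · rintro (h | ⟨rfl | h, hq⟩)
        · exact Or.inl h
        · exact absurd hq hd
        · exact Or.inr ⟨h, hq⟩

-- B's membership filter equals the direct predicate filter.
theorem alt_filter_eq (numbers : List Int) (q : Int → Bool) :
    numbers.filter
        (fun j => !(PySem.Set.contains
            ((PySem.Set.ofList numbers).foldl
              (fun bad v => if q v then PySem.Set.add bad v else bad) PySem.Set.empty) j))
      = numbers.filter (fun j => !q j) := by
  apply List.filter_congr
  intro j hj
  have hmem : (j ∈ (PySem.Set.ofList numbers).foldl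
      (fun bad v => if q v then PySem.Set.add bad v else bad) PySem.Set.empty)
      ↔ (j ∈ numbers ∧ q j = true) := by
    rw [mem_foldl_add, PySem.Set.mem_ofList]
    exact or_iff_right (by simp [PySem.Set.empty])
  have hc : PySem.Set.contains
      ((PySem.Set.ofList numbers).foldl
        (fun bad v => if q v then PySem.Set.add bad v else bad) PySem.Set.empty) j = q j := by
    cases hq : q j
    · refine Bool.eq_false_iff.mpr (fun h => ?_)
      have hm := hmem.mp ((PySem.Set.contains_iff _ _).mp h)
      rw [hq] at hm
      exact absurd hm.2 (by simp)
    · exact (PySem.Set.contains_iff _ _).mpr (hmem.mpr ⟨hj, hq⟩)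
  rw [hc]

-- ===== VERDICT (by name: the statement is the Claim_ definition above) =====
theorem isDivied_spec : Claim_equal_isDivied := by
  intro numbers target _ _
  unfold Spec_isDivied isDivied isDivied_alt
  simp only [foldl_filter_targets, alt_filter_eq]
  rcases h : numbers.filter (fun j => !target.any (fun i => PySem.Int.mod i j == 0)) with _ | _ <;>
    simp
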